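-- pv_equiv track=rewrite | github.com/MatteoGioCrs/rise-match | backend/matching/academic.py | _fuzzy_major_match
-- ===== SOURCE A (Python) =====
-- _MAJOR_SYNONYMS: dict[str, list[str]] = {
--     "biology": ["bio", "biologie", "life science", "sciences de la vie"],
--     "business": ["management", "finance", "commerce", "gestion", "economics", "économie"],
--     "engineering": ["ingénierie", "computer science", "informatique", "cs", "mechanical", "electrical"],
--     "psychology": ["psychologie", "psych", "behavioral"],
--     "communications": ["communication", "media", "journalism"],
--     "sport science": ["kinesiology", "exercise science", "sports management", "staps"],
--     "medicine": ["pre-med", "pre med", "health science", "santé", "nursing"],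
--     "law": ["droit", "legal", "pre-law"],
--     "arts": ["fine arts", "design", "architecture", "arts plastiques"],
--     "education": ["teaching", "pédagogie", "enseignement"],
-- }
--
-- def _normalise(text: str) -> str:
--     return text.lower().strip()
--
-- def _fuzzy_major_match(target: str, available: list[dict]) -> bool:
--     """Check if a target major keyword fuzzy-matches any available program."""
--     t = _normalise(target)
--
--     # Direct substring match on program titles
--     for prog in available:
--         title = _normalise(prog.get("title", ""))
--         if t in title or title in t:
--             return True
--
--     # Synonym expansion
--     for canonical, synonyms in _MAJOR_SYNONYMS.items():
--         group = [canonical] + synonyms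
--         if any(s in t for s in group):
--             for prog in available:
--                 title = _normalise(prog.get("title", ""))
--                 if any(s in title for s in group):
--                     return True
--     return False
-- ===== SOURCE B (Python) =====
-- _MAJOR_SYNONYMS: dict[str, list[str]] = {
--     "biology": ["bio", "biologie", "life science", "sciences de la vie"],
--     "business": ["management", "finance", "commerce", "gestion", "economics", "économie"],
--     "engineering": ["ingénierie", "computer science", "informatique", "cs", "mechanical", "electrical"],
--     "psychology": ["psychologie", "psych", "behavioral"],
--     "communications": ["communication", "media", "journalism"],
--     "sport science": ["kinesiology", "exercise science", "sports management", "staps"],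
--     "medicine": ["pre-med", "pre med", "health science", "santé", "nursing"],
--     "law": ["droit", "legal", "pre-law"],
--     "arts": ["fine arts", "design", "architecture", "arts plastiques"],
--     "education": ["teaching", "pédagogie", "enseignement"],
-- }
--
-- def _normalise(text: str) -> str:
--     return text.lower().strip()
--
-- def _fuzzy_major_match(target: str, available: list[dict]) -> bool:
--     """Precompute the synonym members relevant to the target, then scan programs once."""
--     t = _normalise(target)
--
--     # Members of every synonym group that fires on the target
--     members: list[str] = []
--     for canonical, synonyms in _MAJOR_SYNONYMS.items():
--         group = [canonical] + synonyms
--         if any(s in t for s in group):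
--             members.extend(group)
--
--     # Single pass over the programs
--     for prog in available:
--         title = _normalise(prog.get("title", ""))
--         if t in title or title in t or any(s in title for s in members):
--             return True
--     return False
-- ===== Notes on version B (the rewrite author's own statement) =====
-- stated objective: simpler
-- what changed: A scans the programs in a direct-match pass and then again inside a loop over the 10 synonym groups; B first collects the members of every synonym group that fires on the target into one list, then decides the result in a single pass over the programs, normalising each title exactly once.
import Mathlib
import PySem

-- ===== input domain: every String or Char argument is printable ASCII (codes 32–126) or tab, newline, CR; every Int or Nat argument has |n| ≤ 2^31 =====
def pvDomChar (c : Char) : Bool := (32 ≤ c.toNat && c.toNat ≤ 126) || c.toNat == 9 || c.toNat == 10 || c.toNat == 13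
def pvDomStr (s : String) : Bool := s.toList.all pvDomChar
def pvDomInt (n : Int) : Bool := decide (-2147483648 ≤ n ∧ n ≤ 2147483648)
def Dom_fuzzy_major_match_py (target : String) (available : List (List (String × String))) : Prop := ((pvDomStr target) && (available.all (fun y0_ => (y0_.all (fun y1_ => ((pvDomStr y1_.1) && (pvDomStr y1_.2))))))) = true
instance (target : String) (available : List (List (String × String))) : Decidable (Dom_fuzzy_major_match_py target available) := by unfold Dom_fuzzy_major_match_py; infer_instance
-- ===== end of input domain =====

-- B precomputes the synonym members matching the target once, then scans the programs in a single pass (objective: simpler; same Bool for every input).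

-- shared module-level context (the _MAJOR_SYNONYMS table and _normalise), used by both ports
def pvSynonyms : List (String × List String) :=
  [("biology", ["bio", "biologie", "life science", "sciences de la vie"]),
   ("business", ["management", "finance", "commerce", "gestion", "economics", "économie"]),
   ("engineering", ["ingénierie", "computer science", "informatique", "cs", "mechanical", "electrical"]),
   ("psychology", ["psychologie", "psych", "behavioral"]),
   ("communications", ["communication", "media", "journalism"]),
   ("sport science", ["kinesiology", "exercise science", "sports management", "staps"]),
   ("medicine", ["pre-med", "pre med", "health science", "santé", "nursing"]),
   ("law", ["droit", "legal", "pre-law"]),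
   ("arts", ["fine arts", "design", "architecture", "arts plastiques"]),
   ("education", ["teaching", "pédagogie", "enseignement"])]

def pvNormalise (text : String) : String := PySem.Str.strip (PySem.Str.lower text)

-- ===== PORT A =====
def fuzzy_major_match_py (target : String) (available : List (List (String × String))) : Bool :=
  let t := pvNormalise target
  -- Direct substring match on program titles (first loop, early return)
  if available.any (fun prog =>
       let title := pvNormalise ((PySem.Dict.mk prog).getD "title" "")
       PySem.Str.isIn t title || PySem.Str.isIn title t) then
    true
  else
    -- Synonym expansion: outer loop over groups, inner loop over programs
    pvSynonyms.any (fun cs =>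
      let group := cs.1 :: cs.2
      (group.any fun s => PySem.Str.isIn s t) &&
        available.any (fun prog =>
          let title := pvNormalise ((PySem.Dict.mk prog).getD "title" "")
          group.any (fun s => PySem.Str.isIn s title)))

-- ===== PORT B =====
def fuzzy_major_match_py_alt (target : String) (available : List (List (String × String))) : Bool :=
  let t := pvNormalise target
  -- members of every synonym group that fires on the target
  let members := pvSynonyms.foldl (fun acc cs =>
      let group := cs.1 :: cs.2
      if group.any (fun s => PySem.Str.isIn s t) then acc ++ group else acc) []
  -- single pass over the programs
  available.any (fun prog =>
    let title := pvNormalise ((PySem.Dict.mk prog).getD "title" "")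
    PySem.Str.isIn t title || PySem.Str.isIn title t
      || members.any (fun s => PySem.Str.isIn s title))

-- ===== PRECONDITION & SPEC =====
def Spec_fuzzy_major_match_py (target : String) (available : List (List (String × String))) (out : Bool) : Prop := out = fuzzy_major_match_py_alt target available
instance (target : String) (available : List (List (String × String))) (out : Bool) : Decidable (Spec_fuzzy_major_match_py target available out) := by unfold Spec_fuzzy_major_match_py; infer_instance

-- ===== CLAIM (what is proved, stated in full; the proofs are below) =====
def Claim_equal_fuzzy_major_match_py : Prop := ∀ (target : String) (available : List (List (String × String))), Dom_fuzzy_major_match_py target available → Spec_fuzzy_major_match_py target available (fuzzy_major_match_py target available)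

-- ===== LEMMAS AND PROOFS =====

-- membership in B's accumulated member list
theorem pv_mem_members (t : String) (s : String) :
    (s ∈ pvSynonyms.foldl (fun acc cs =>
        if (cs.1 :: cs.2).any (fun s => PySem.Str.isIn s t) then acc ++ (cs.1 :: cs.2) else acc) []) ↔
    ∃ cs ∈ pvSynonyms, ((cs.1 :: cs.2).any (fun s => PySem.Str.isIn s t)) = true ∧ s ∈ cs.1 :: cs.2 := by
  have h : ∀ (l : List (String × List String)) (acc : List String),
      (s ∈ l.foldl (fun acc cs =>
          if (cs.1 :: cs.2).any (fun s => PySem.Str.isIn s t) then acc ++ (cs.1 :: cs.2) else acc) acc) ↔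
      s ∈ acc ∨ ∃ cs ∈ l, ((cs.1 :: cs.2).any (fun s => PySem.Str.isIn s t)) = true ∧ s ∈ cs.1 :: cs.2 := by
    intro l
    induction l with
    | nil => intro acc; simp
    | cons hd tl ih =>
      intro acc
      rw [List.foldl_cons]
      by_cases hhd : ((hd.1 :: hd.2).any (fun s => PySem.Str.isIn s t)) = true
      · rw [if_pos hhd, ih, List.mem_append]
        constructor
        · rintro ((h | h) | ⟨cs, hcs, hx⟩)
          · exact Or.inl h
          · exact Or.inr ⟨hd, List.mem_cons_self, hhd, h⟩
          · exact Or.inr ⟨cs, List.mem_cons_of_mem _ hcs, hx⟩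
        · rintro (h | ⟨cs, hcs, hact, hmem⟩)
          · exact Or.inl (Or.inl h)
          · rcases List.mem_cons.mp hcs with rfl | hcs
            · exact Or.inl (Or.inr hmem)
            · exact Or.inr ⟨cs, hcs, hact, hmem⟩
      · rw [if_neg hhd, ih]
        constructor
        · rintro (h | ⟨cs, hcs, hx⟩)
          · exact Or.inl h
          · exact Or.inr ⟨cs, List.mem_cons_of_mem _ hcs, hx⟩
        · rintro (h | ⟨cs, hcs, hact, hmem⟩)
          · exact Or.inl h
          · rcases List.mem_cons.mp hcs with rfl | hcs
            · exact absurd hact hhd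
            · exact Or.inr ⟨cs, hcs, hact, hmem⟩
  simpa using h pvSynonyms []

theorem fuzzy_equal (target : String) (available : List (List (String × String))) :
    fuzzy_major_match_py target available = fuzzy_major_match_py_alt target available := by
  unfold fuzzy_major_match_py fuzzy_major_match_py_alt
  dsimp only
  rw [Bool.eq_iff_iff]
  constructor
  · intro h
    split_ifs at h with hdir
    · -- some program matches directly
      rw [List.any_eq_true] at hdir ⊢
      obtain ⟨prog, hp, hm⟩ := hdir
      exact ⟨prog, hp, by simp only [hm, Bool.true_or]⟩
    · -- a synonym group fires
      rw [List.any_eq_true] at h ⊢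
      obtain ⟨cs, hcs, hc⟩ := h
      rw [Bool.and_eq_true] at hc
      obtain ⟨hact, hprog⟩ := hc
      rw [List.any_eq_true] at hprog
      obtain ⟨prog, hp, hm⟩ := hprog
      refine ⟨prog, hp, ?_⟩
      rw [List.any_eq_true] at hm
      obtain ⟨s, hs, hsin⟩ := hm
      have : ((pvSynonyms.foldl (fun acc cs =>
          if (cs.1 :: cs.2).any (fun s => PySem.Str.isIn s (pvNormalise target)) then acc ++ (cs.1 :: cs.2) else acc) []).any
          (fun s => PySem.Str.isIn s (pvNormalise ((PySem.Dict.mk prog).getD "title" "")))) = true := by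
        rw [List.any_eq_true]
        exact ⟨s, (pv_mem_members _ s).mpr ⟨cs, hcs, hact, hs⟩, hsin⟩
      simp only [this, Bool.or_true]
  · intro h
    rw [List.any_eq_true] at h
    obtain ⟨prog, hp, hm⟩ := h
    rw [Bool.or_eq_true, Bool.or_eq_true] at hm
    rcases hm with hdir | hmem
    · -- direct match: A's first loop fires
      have : (available.any (fun prog =>
          PySem.Str.isIn (pvNormalise target) (pvNormalise ((PySem.Dict.mk prog).getD "title" "")) ||
          PySem.Str.isIn (pvNormalise ((PySem.Dict.mk prog).getD "title" "")) (pvNormalise target))) = true := by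
        rw [List.any_eq_true]
        exact ⟨prog, hp, by rw [Bool.or_eq_true]; exact hdir⟩
      rw [if_pos this]
    · -- member match: A's synonym loop fires (whatever the first loop does)
      split_ifs with hdir
      · rfl
      rw [List.any_eq_true] at hmem
      obtain ⟨s, hs, hsin⟩ := hmem
      obtain ⟨cs, hcs, hact, hsg⟩ := (pv_mem_members _ s).mp hs
      rw [List.any_eq_true]
      refine ⟨cs, hcs, ?_⟩
      rw [Bool.and_eq_true]
      refine ⟨hact, ?_⟩
      rw [List.any_eq_true]
      exact ⟨prog, hp, by rw [List.any_eq_true]; exact ⟨s, hsg, hsin⟩⟩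

-- ===== VERDICT (by name: the statement is the Claim_ definition above) =====
theorem fuzzy_major_match_py_spec : Claim_equal_fuzzy_major_match_py := by
  intro target available _
  unfold Spec_fuzzy_major_match_py
  exact fuzzy_equal target available
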